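-- pv_equiv track=rewrite | github.com/MrBrantCode/unitest_baseline | mut_generate/mist_train_cf/cf_4812/solution.py | replace_and_count
-- ===== SOURCE A (Python) =====
-- def replace_and_count(string):
--     count = 0
--     replaced_string = ""
--
--     for char in string:
--         if char == "e":
--             count += 1
--             replaced_string += "X"
--         else:
--             replaced_string += char
--
--     return replaced_string, count
-- ===== SOURCE B (Python) =====
-- def replace_and_count(string):
--     parts = string.split("e")
--     return "X".join(parts), len(parts) - 1
-- ===== Notes on version B (the rewrite author's own statement) =====
-- stated objective: faster
-- what changed: Replaces the explicit per-character loop with counter and repeated string concatenation by a single split on the target character and a join with the replacement, deriving the count from the number of split pieces.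
import Mathlib
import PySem

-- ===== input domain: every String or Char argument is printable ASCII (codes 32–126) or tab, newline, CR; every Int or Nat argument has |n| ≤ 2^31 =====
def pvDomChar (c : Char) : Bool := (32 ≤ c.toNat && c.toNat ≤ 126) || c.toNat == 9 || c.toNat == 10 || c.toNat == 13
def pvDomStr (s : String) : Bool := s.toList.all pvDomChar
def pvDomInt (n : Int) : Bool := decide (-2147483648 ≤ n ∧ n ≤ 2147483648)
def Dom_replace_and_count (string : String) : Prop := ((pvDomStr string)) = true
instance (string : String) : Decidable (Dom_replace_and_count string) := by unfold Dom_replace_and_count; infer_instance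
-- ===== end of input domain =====

-- B replaces A's char-by-char loop (counter + concatenation) by split-on-'e' / join-with-'X',
-- counting the split boundaries; same return value, idiomatic decomposition.


-- ===== PORT A =====
-- for char in string: if char == 'e' then count += 1; replaced_string += 'X' else += char
def replace_and_count (string : String) : String × Int :=
  let r := string.toList.foldl
    (fun (st : List Char × Int) c =>
      if c == 'e' then (st.1 ++ ['X'], st.2 + 1) else (st.1 ++ [c], st.2))
    ([], 0)
  (String.ofList r.1, r.2)

-- ===== PORT B =====
-- parts = string.split("e"); return "X".join(parts), len(parts) - 1
def replace_and_count_alt (string : String) : String × Int :=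
  let parts := PySem.Chars.splitOn string.toList ['e']
  (String.ofList (PySem.Chars.join ['X'] parts), (parts.length : Int) - 1)

-- ===== PRECONDITION & SPEC =====
def Spec_replace_and_count (string : String) (out : String × Int) : Prop := out = replace_and_count_alt string
instance (string : String) (out : String × Int) : Decidable (Spec_replace_and_count string out) := by unfold Spec_replace_and_count; infer_instance

-- ===== CLAIM (what is proved, stated in full; the proofs are below) =====
def Claim_equal_replace_and_count : Prop := ∀ (string : String), Dom_replace_and_count string → Spec_replace_and_count string (replace_and_count string)

-- ===== LEMMAS AND PROOFS =====

-- structural single-char split on 'e' (proof-side characterisation of PySem.Chars.splitOn)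
def spE : List Char → List (List Char)
  | [] => [[]]
  | c :: rest =>
    if c = 'e' then [] :: spE rest
    else match spE rest with
      | p :: ps => (c :: p) :: ps
      | [] => [[c]]

theorem spE_ne_nil (l : List Char) : spE l ≠ [] := by
  cases l with
  | nil => simp [spE]
  | cons c rest =>
    simp only [spE]
    split
    · simp
    · cases h : spE rest <;> simp

-- consHead p L prepends p to the first piece of L
def consHead (p : List Char) : List (List Char) → List (List Char)
  | q :: qs => (p ++ q) :: qs
  | [] => [p]

theorem spE_cons_e (rest : List Char) : spE ('e' :: rest) = [] :: spE rest := by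
  simp [spE]

theorem spE_cons_ne (c : Char) (rest : List Char) (hc : c ≠ 'e') :
    spE (c :: rest) = consHead [c] (spE rest) := by
  simp only [spE, if_neg hc]
  cases h : spE rest <;> simp [consHead]

theorem consHead_nil_left (L : List (List Char)) (hL : L ≠ []) : consHead [] L = L := by
  cases L with
  | nil => exact absurd rfl hL
  | cons q qs => simp [consHead]

theorem go_spec (fuel : Nat) (l cur : List Char) (acc : List (List Char))
    (h : l.length < fuel) :
    PySem.Chars.splitOn.go ['e'] fuel l cur acc
      = acc.reverse ++ consHead cur.reverse (spE l) := by
  induction fuel generalizing l cur acc with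
  | zero => omega
  | succ fuel ih =>
    cases l with
    | nil =>
      simp [PySem.Chars.splitOn.go, spE, consHead]
    | cons c rest =>
      rw [PySem.Chars.splitOn.go]
      by_cases hc : c = 'e'
      · subst hc
        have hpre : List.isPrefixOf ['e'] ('e' :: rest) = true := by
          simp [List.isPrefixOf]
        simp only [hpre, if_pos]
        rw [ih _ _ _ (by simpa using Nat.lt_of_succ_lt_succ h)]
        rw [spE_cons_e]
        have hd : List.drop (['e'].length) ('e' :: rest) = rest := rfl
        rw [hd, List.reverse_nil, consHead_nil_left _ (spE_ne_nil rest)]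
        simp [consHead]
      · have hpre : List.isPrefixOf ['e'] (c :: rest) = false := by
          simp [List.isPrefixOf]
          exact fun h => absurd h.symm hc
        simp only [hpre]
        rw [if_neg (by simp)]
        rw [ih _ _ _ (by simpa using Nat.lt_of_succ_lt_succ h)]
        rw [spE_cons_ne c rest hc]
        cases h' : spE rest with
        | nil => exact absurd h' (spE_ne_nil rest)
        | cons p ps => simp [consHead]

theorem splitOn_eq_spE (l : List Char) :
    PySem.Chars.splitOn l ['e'] = spE l := by
  rw [PySem.Chars.splitOn, go_spec _ _ _ _ (by omega)]
  simpa using consHead_nil_left _ (spE_ne_nil l)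

def replE (c : Char) : Char := if c = 'e' then 'X' else c

theorem join_spE (l : List Char) :
    PySem.Chars.join ['X'] (spE l) = l.map replE := by
  induction l with
  | nil => simp [spE, PySem.Chars.join_singleton]
  | cons c rest ih =>
    by_cases hc : c = 'e'
    · subst hc
      rw [spE_cons_e]
      cases h : spE rest with
      | nil => exact absurd h (spE_ne_nil rest)
      | cons p ps =>
        rw [PySem.Chars.join_cons_cons]
        rw [← h, ih]
        simp [replE]
    · rw [spE_cons_ne c rest hc]
      cases h : spE rest with
      | nil => exact absurd h (spE_ne_nil rest)
      | cons p ps =>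
        cases ps with
        | nil =>
          simp only [consHead]
          rw [PySem.Chars.join_singleton]
          rw [h, PySem.Chars.join_singleton] at ih
          simp [ih, replE, hc]
        | cons q qs =>
          simp only [consHead]
          rw [PySem.Chars.join_cons_cons]
          rw [h, PySem.Chars.join_cons_cons] at ih
          simp only [List.map_cons, List.cons_append]
          rw [← ih]
          simp [replE, hc]

theorem length_spE (l : List Char) :
    ((spE l).length : Int) - 1 = (l.count 'e' : Int) := by
  induction l with
  | nil => simp [spE]
  | cons c rest ih =>
    by_cases hc : c = 'e'
    · subst hc
      rw [spE_cons_e, List.count_cons_self]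
      simp only [List.length_cons]
      omega
    · rw [spE_cons_ne c rest hc, List.count_cons_of_ne (by simpa using hc)]
      cases h : spE rest with
      | nil => exact absurd h (spE_ne_nil rest)
      | cons p ps =>
        rw [h] at ih
        simpa [consHead] using ih

theorem foldl_A (l : List Char) (acc : List Char) (k : Int) :
    l.foldl
      (fun (st : List Char × Int) c =>
        if c == 'e' then (st.1 ++ ['X'], st.2 + 1) else (st.1 ++ [c], st.2))
      (acc, k)
      = (acc ++ l.map replE, k + (l.count 'e' : Int)) := by
  induction l generalizing acc k with
  | nil => simp
  | cons c rest ih =>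
    by_cases hc : c = 'e'
    · subst hc
      simp only [List.foldl_cons, beq_self_eq_true, if_pos, List.count_cons_self]
      rw [ih]
      simp [replE]
      ring
    · simp only [List.foldl_cons]
      rw [if_neg (by simpa using hc)]
      rw [ih, List.count_cons_of_ne (by simpa using hc)]
      simp [replE, hc]

-- ===== VERDICT (by name: the statement is the Claim_ definition above) =====
theorem replace_and_count_spec : Claim_equal_replace_and_count := by
  intro s _
  unfold Spec_replace_and_count replace_and_count replace_and_count_alt
  simp only [splitOn_eq_spE, join_spE, length_spE, foldl_A]
  simp
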